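-- pv_equiv track=rewrite | github.com/ArunGopinathan/DataStructuresAndAlgorithms | Superiors.py | calculate
-- ===== SOURCE A (Python) =====
-- from collections import deque
--
-- def calculate(tree):
--     queue = deque(tree[0])
--     handshakes = fistbumps = nodes = level = 0
--     while queue:
--         for _ in range(len(queue)):
--             root = queue.popleft()
--             handshakes += level
--             fistbumps += nodes - level
--             nodes += 1
--             queue.extend(tree[root])
--         level += 1
--     return handshakes, fistbumps
-- ===== SOURCE B (Python) =====
-- def calculate(tree):
--     # Depth-first traversal with an explicit stack of (node, depth) pairs,
--     # accumulating the depth sum (= handshakes) and the node count n; the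
--     # fistbumps are then the closed form n*(n-1)//2 - handshakes, since each
--     # processed node contributes its processing index minus its level.
--     stack = [(r, 0) for r in tree[0]]
--     depth_sum = 0
--     n = 0
--     while stack:
--         node, d = stack.pop()
--         depth_sum += d
--         n += 1
--         for c in tree[node]:
--             stack.append((c, d + 1))
--     return depth_sum, n * (n - 1) // 2 - depth_sum
-- ===== Notes on version B (the rewrite author's own statement) =====
-- stated objective: alternative
-- what changed: Replaces the level-batched BFS over a deque with four running counters (handshakes, fistbumps, nodes, level) by a depth-first traversal with an explicit stack of (node, depth) pairs that accumulates only the depth sum and the node count, recovering fistbumps by the closed form n*(n-1)//2 - handshakes.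
import Mathlib
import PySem

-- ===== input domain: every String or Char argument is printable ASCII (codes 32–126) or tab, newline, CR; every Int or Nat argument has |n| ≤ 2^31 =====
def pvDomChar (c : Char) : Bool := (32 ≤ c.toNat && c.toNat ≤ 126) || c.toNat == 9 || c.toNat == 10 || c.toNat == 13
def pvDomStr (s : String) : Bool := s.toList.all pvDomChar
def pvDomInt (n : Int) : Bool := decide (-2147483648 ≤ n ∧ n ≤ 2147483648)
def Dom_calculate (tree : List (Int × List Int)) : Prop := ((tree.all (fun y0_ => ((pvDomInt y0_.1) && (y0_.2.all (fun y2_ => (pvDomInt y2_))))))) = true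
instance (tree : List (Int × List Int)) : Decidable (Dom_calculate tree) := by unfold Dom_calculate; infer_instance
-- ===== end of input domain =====

-- B replaces A's level-batched BFS over a queue with running (handshakes, fistbumps, nodes,
-- level) counters by a depth-first traversal with an explicit stack of (node, depth) pairs that
-- accumulates only the depth sum and the node count, and closed forms for the two answers.

-- tree[k] for the dict: first-match lookup; the .getD [] default is only reached where Python
-- raises KeyError, which Pre_calculate excludes.
def pvChild (t : List (Int × List Int)) (k : Int) : List Int :=
  ((t.find? (fun p => p.1 == k)).map (·.2)).getD []

-- ===== PORT A =====
-- the inner 'for _ in range(len(queue))' pass: processes one whole level of the queue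
def pvLevel (t : List (Int × List Int)) (F : List Int) (level : Int)
    (acc : Int × Int × Int) : (Int × Int × Int) × List Int :=
  F.foldl (fun s root =>
      ((s.1.1 + level, s.1.2.1 + (s.1.2.2 - level), s.1.2.2 + 1), s.2 ++ pvChild t root))
    (acc, [])

-- the outer 'while queue' loop; fuel t.length + 1 levels (proved sufficient under Pre_calculate)
def pvLoop (t : List (Int × List Int)) :
    Nat → List Int → Int → Int → Int → Int → Int × Int
  | 0, _, _, hs, fb, _ => (hs, fb)
  | fuel + 1, F, level, hs, fb, nodes =>
    if F = [] then (hs, fb)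
    else
      let r := pvLevel t F level (hs, fb, nodes)
      pvLoop t fuel r.2 (level + 1) r.1.1 r.1.2.1 r.1.2.2

def calculate (tree : List (Int × List Int)) : Int × Int :=
  pvLoop tree (tree.length + 1) (pvChild tree 0) 0 0 0 0

-- ===== PORT B =====
-- The fuel for B's 'while stack' loop: a proved upper bound on its iteration count (the total
-- number of visited (node, depth) states), computed via the fuel-indexed subtree summary pvW
-- below (these definitions sit above the port only because the port's fuel needs them).
def pvW : Nat → List (Int × List Int) → Int → Int × Int
  | 0, _, _ => (1, 0)
  | f + 1, t, k =>
    (pvChild t k).foldl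
      (fun p c => ((p.1 + (pvW f t c).1, p.2 + (pvW f t c).2 + (pvW f t c).1) : Int × Int)) (1, 0)

def pvC (t : List (Int × List Int)) (k : Int) : Int × Int := pvW (t.length + 1) t k

def pvMc (t : List (Int × List Int)) (F : List Int) : Int :=
  (F.map (fun k => (pvC t k).1)).sum

-- the 'while stack' loop: pop the top (head), count it, push the children; the Python pushes
-- the children in order and pops from the end of the list, hence the '.reverse ++' for a
-- head-is-top stack
def pvDfs (t : List (Int × List Int)) :
    Nat → List (Int × Int) → Int → Int → Int × Int
  | 0, _, ds, n => (ds, n)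
  | _ + 1, [], ds, n => (ds, n)
  | fuel + 1, (k, d) :: rest, ds, n =>
    pvDfs t fuel (((pvChild t k).map (fun c => (c, d + 1))).reverse ++ rest) (ds + d) (n + 1)

def calculate_alt (tree : List (Int × List Int)) : Int × Int :=
  let r := pvDfs tree ((pvMc tree (pvChild tree 0)).toNat + 1)
    ((pvChild tree 0).map (fun c => (c, 0))) 0 0
  (r.1, PySem.Int.floordiv (r.2 * (r.2 - 1)) 2 - r.1)

-- ===== PRECONDITION & SPEC =====
-- the standard finite reachability closure of the dict viewed as a graph (NOT either port's
-- loop): one step adds all children of the set; t.length + 1 steps reach the fixpoint whenever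
-- the closure stays among the keys
def pvStepF (t : List (Int × List Int)) (S : Finset Int) : Finset Int :=
  S ∪ S.biUnion (fun k => (pvChild t k).toFinset)

def pvClos (t : List (Int × List Int)) (S : Finset Int) : Finset Int :=
  (pvStepF t)^[t.length + 1] S

def pvReach (t : List (Int × List Int)) : Finset Int :=
  pvClos t (pvChild t 0).toFinset

-- Pre_calculate holds exactly on the inputs where the Python A returns: 0 is a key of the dict
-- and every node reachable from tree[0] is itself a key (otherwise A raises KeyError on the
-- missing node) and the reachable part of the graph is acyclic, i.e. no reachable node is
-- among its own proper descendants (otherwise A's queue never empties and A loops forever).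
def Pre_calculate (tree : List (Int × List Int)) : Prop :=
  (0 : Int) ∈ tree.map Prod.fst ∧
    (∀ k ∈ pvReach tree, k ∈ tree.map Prod.fst) ∧
    (∀ k ∈ pvReach tree, k ∉ pvClos tree (pvChild tree k).toFinset)
instance (tree : List (Int × List Int)) : Decidable (Pre_calculate tree) := by
  unfold Pre_calculate; infer_instance

def pvWitness_calculate : (List (Int × List Int)) := [(0, [1, 2]), (1, [3]), (2, []), (3, [])]

def Spec_calculate (tree : List (Int × List Int)) (out : Int × Int) : Prop := out = calculate_alt tree
instance (tree : List (Int × List Int)) (out : Int × Int) : Decidable (Spec_calculate tree out) := by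
  unfold Spec_calculate; infer_instance

-- ===== CLAIM (what is proved, stated in full; the proofs are below) =====
def Claim_equal_calculate : Prop := ∀ (tree : List (Int × List Int)), Dom_calculate tree → Pre_calculate tree → Spec_calculate tree (calculate tree)

-- ===== LEMMAS AND PROOFS =====

def pvKeysF (t : List (Int × List Int)) : Finset Int := (t.map Prod.fst).toFinset

-- rank of a node: the number of nodes in its reflexive descendant closure; strictly decreasing
-- along edges of the acyclic reachable part
def pvRank (t : List (Int × List Int)) (k : Int) : Nat :=
  (insert k (pvClos t (pvChild t k).toFinset)).card

theorem pvSubset_stepF (t : List (Int × List Int)) (S : Finset Int) : S ⊆ pvStepF t S :=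
  Finset.subset_union_left

theorem pvStepF_mono (t : List (Int × List Int)) {S T : Finset Int} (h : S ⊆ T) :
    pvStepF t S ⊆ pvStepF t T :=
  Finset.union_subset_union h (Finset.biUnion_subset_biUnion_of_subset_left _ h)

theorem pvIter_le (t : List (Int × List Int)) (S : Finset Int) :
    ∀ n, (pvStepF t)^[n] S ⊆ (pvStepF t)^[n + 1] S := by
  intro n
  rw [Function.iterate_succ_apply']
  exact pvSubset_stepF t _

theorem pvIter_chain (t : List (Int × List Int)) (S : Finset Int) :
    ∀ {a b : Nat}, a ≤ b → (pvStepF t)^[a] S ⊆ (pvStepF t)^[b] S := by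
  intro a b h
  induction b with
  | zero => simp [Nat.le_zero.mp h]
  | succ b IH =>
    rcases Nat.lt_or_ge a (b + 1) with hab | hab
    · exact (IH (by omega)).trans (pvIter_le t S b)
    · have : a = b + 1 := by omega
      subst this; exact fun x hx => hx

theorem pvSubset_clos (t : List (Int × List Int)) (S : Finset Int) : S ⊆ pvClos t S :=
  pvIter_chain t S (Nat.zero_le _)

theorem pvIter_growth (t : List (Int × List Int)) (S : Finset Int) :
    ∀ N, (∀ n < N, (pvStepF t)^[n + 1] S ≠ (pvStepF t)^[n] S) → N ≤ ((pvStepF t)^[N] S).card := by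
  intro N
  induction N with
  | zero => intro _; omega
  | succ N IH =>
    intro h
    have h1 : ((pvStepF t)^[N] S) ⊂ ((pvStepF t)^[N + 1] S) :=
      Finset.ssubset_iff_subset_ne.mpr ⟨pvIter_le t S N, fun he => h N (by omega) he.symm⟩
    have := Finset.card_lt_card h1
    have := IH (fun n hn => h n (by omega))
    omega

theorem pvClos_fix (t : List (Int × List Int)) (S : Finset Int)
    (hb : pvClos t S ⊆ pvKeysF t) : pvStepF t (pvClos t S) = pvClos t S := by
  by_cases hex : ∃ n, n ≤ t.length ∧ (pvStepF t)^[n + 1] S = (pvStepF t)^[n] S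
  · obtain ⟨n, hn, hfix⟩ := hex
    have hall : ∀ j, (pvStepF t)^[n + j] S = (pvStepF t)^[n] S := by
      intro j
      induction j with
      | zero => rfl
      | succ j IH =>
        have : n + (j + 1) = (n + j) + 1 := by omega
        rw [this, Function.iterate_succ_apply', IH, ← Function.iterate_succ_apply' (pvStepF t) n S,
            hfix]
    have hc : pvClos t S = (pvStepF t)^[n] S := by
      have : t.length + 1 = n + (t.length + 1 - n) := by omega
      unfold pvClos
      rw [this, hall]
    rw [hc, ← Function.iterate_succ_apply' (pvStepF t) n S, hfix]
  · push Not at hex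
    exfalso
    have hg := pvIter_growth t S (t.length + 1) (fun n hn => hex n (by omega))
    have h1 : ((pvStepF t)^[t.length + 1] S).card ≤ (pvKeysF t).card :=
      Finset.card_le_card hb
    have h2 : (pvKeysF t).card ≤ t.length := by
      have := List.toFinset_card_le (t.map Prod.fst)
      simpa [pvKeysF] using this
    omega

theorem pvClos_min (t : List (Int × List Int)) {S R : Finset Int}
    (hSR : S ⊆ R) (hfix : pvStepF t R = R) : pvClos t S ⊆ R := by
  have : ∀ n, (pvStepF t)^[n] S ⊆ R := by
    intro n
    induction n with
    | zero => exact hSR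
    | succ n IH =>
      rw [Function.iterate_succ_apply']
      exact (pvStepF_mono t IH).trans (le_of_eq hfix)
  exact this _

theorem pvReach_sub (t : List (Int × List Int)) (h : Pre_calculate t) :
    pvReach t ⊆ pvKeysF t := by
  intro k hk
  have := h.2.1 k hk
  simpa [pvKeysF] using this

theorem pvReach_fix (t : List (Int × List Int)) (h : Pre_calculate t) :
    pvStepF t (pvReach t) = pvReach t :=
  pvClos_fix t _ (pvReach_sub t h)

theorem pvChild_mem_stepF (t : List (Int × List Int)) {S : Finset Int} {k c : Int}
    (hk : k ∈ S) (hc : c ∈ pvChild t k) : c ∈ pvStepF t S := by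
  unfold pvStepF
  apply Finset.mem_union_right
  exact Finset.mem_biUnion.mpr ⟨k, hk, List.mem_toFinset.mpr hc⟩

theorem pvChild_reach (t : List (Int × List Int)) (h : Pre_calculate t) {k c : Int}
    (hk : k ∈ pvReach t) (hc : c ∈ pvChild t k) : c ∈ pvReach t := by
  rw [← pvReach_fix t h]
  exact pvChild_mem_stepF t hk hc

theorem pvDplus_sub (t : List (Int × List Int)) (h : Pre_calculate t) {k : Int}
    (hk : k ∈ pvReach t) : pvClos t (pvChild t k).toFinset ⊆ pvReach t := by
  apply pvClos_min t _ (pvReach_fix t h)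
  intro c hc
  exact pvChild_reach t h hk (List.mem_toFinset.mp hc)

theorem pvDplus_fix (t : List (Int × List Int)) (h : Pre_calculate t) {k : Int}
    (hk : k ∈ pvReach t) :
    pvStepF t (pvClos t (pvChild t k).toFinset) = pvClos t (pvChild t k).toFinset :=
  pvClos_fix t _ ((pvDplus_sub t h hk).trans (pvReach_sub t h))

theorem pvRank_lt (t : List (Int × List Int)) (h : Pre_calculate t) {k c : Int}
    (hk : k ∈ pvReach t) (hc : c ∈ pvChild t k) : pvRank t c < pvRank t k := by
  have hcD : c ∈ pvClos t (pvChild t k).toFinset :=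
    pvSubset_clos t _ (List.mem_toFinset.mpr hc)
  have hsub : insert c (pvClos t (pvChild t c).toFinset) ⊆ pvClos t (pvChild t k).toFinset := by
    apply Finset.insert_subset hcD
    apply pvClos_min t _ (pvDplus_fix t h hk)
    intro x hx
    rw [← pvDplus_fix t h hk]
    exact pvChild_mem_stepF t hcD (List.mem_toFinset.mp hx)
  have hknot : k ∉ pvClos t (pvChild t k).toFinset := h.2.2 k hk
  unfold pvRank
  calc (insert c (pvClos t (pvChild t c).toFinset)).card
      ≤ (pvClos t (pvChild t k).toFinset).card := Finset.card_le_card hsub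
    _ < (insert k (pvClos t (pvChild t k).toFinset)).card := by
        rw [Finset.card_insert_of_notMem hknot]; omega

theorem pvRank_le (t : List (Int × List Int)) (h : Pre_calculate t) {k : Int}
    (hk : k ∈ pvReach t) : pvRank t k ≤ t.length := by
  have hsub : insert k (pvClos t (pvChild t k).toFinset) ⊆ pvKeysF t := by
    apply Finset.insert_subset (pvReach_sub t h hk)
    exact (pvDplus_sub t h hk).trans (pvReach_sub t h)
  have h2 : (pvKeysF t).card ≤ t.length := by
    have := List.toFinset_card_le (t.map Prod.fst)
    simpa [pvKeysF] using this
  have := Finset.card_le_card hsub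
  unfold pvRank
  omega

def pvMs (t : List (Int × List Int)) (F : List Int) (l : Int) : Int :=
  (F.map (fun k => l * (pvC t k).1 + (pvC t k).2)).sum

def pvTri (m : Int) : Int := PySem.Int.floordiv (m * (m - 1)) 2

-- stack versions of the two sums, over (node, depth) pairs
def pvMcP (t : List (Int × List Int)) (S : List (Int × Int)) : Int :=
  (S.map (fun p => (pvC t p.1).1)).sum
def pvMsP (t : List (Int × List Int)) (S : List (Int × Int)) : Int :=
  (S.map (fun p => p.2 * (pvC t p.1).1 + (pvC t p.1).2)).sum

theorem pvW_stable (t : List (Int × List Int)) (h : Pre_calculate t) :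
    ∀ n k, k ∈ pvReach t → ∀ f g, pvRank t k < f → pvRank t k < g →
      pvRank t k = n → pvW f t k = pvW g t k := by
  intro n
  induction n using Nat.strong_induction_on with
  | _ n IH =>
    intro k hk f g hf hg hrk
    subst hrk
    match f, g with
    | f + 1, g + 1 =>
      simp only [pvW]
      apply PySem.List.foldl_congr_mem
      intro acc c hc
      have hcr : c ∈ pvReach t := pvChild_reach t h hk hc
      have hr : pvRank t c < pvRank t k := pvRank_lt t h hk hc
      have : pvW f t c = pvW g t c :=
        IH (pvRank t c) hr c hcr f g (by omega) (by omega) rfl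
      rw [this]

theorem pvC_unfold (t : List (Int × List Int)) (h : Pre_calculate t)
    (k : Int) (hk : k ∈ pvReach t) :
    pvC t k = (pvChild t k).foldl
      (fun p c => ((p.1 + (pvC t c).1, p.2 + (pvC t c).2 + (pvC t c).1) : Int × Int)) (1, 0) := by
  have h1 : pvC t k = pvW (pvRank t k + 1) t k := by
    apply pvW_stable t h (pvRank t k) k hk
    · have := pvRank_le t h hk; omega
    · omega
    · rfl
  rw [h1]
  simp only [pvW]
  apply PySem.List.foldl_congr_mem
  intro acc c hc
  have hcr : c ∈ pvReach t := pvChild_reach t h hk hc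
  have hr : pvRank t c < pvRank t k := pvRank_lt t h hk hc
  have : pvW (pvRank t k) t c = pvC t c := by
    apply pvW_stable t h (pvRank t c) c hcr _ _ (by omega)
    · have := pvRank_le t h hcr; omega
    · rfl
  rw [this]

theorem pvFold_sum (t : List (Int × List Int)) (cs : List Int) :
    ∀ a b : Int, cs.foldl
      (fun p c => ((p.1 + (pvC t c).1, p.2 + (pvC t c).2 + (pvC t c).1) : Int × Int)) (a, b)
      = (a + pvMc t cs, b + pvMs t cs 1) := by
  induction cs with
  | nil => intro a b; simp [pvMc, pvMs]
  | cons c cs IH =>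
    intro a b
    simp only [List.foldl_cons, List.map_cons, List.sum_cons, pvMc, pvMs] at *
    rw [IH]
    rw [Prod.mk.injEq]
    constructor <;> ring

theorem pvMs_linear (t : List (Int × List Int)) (F : List Int) (l : Int) :
    pvMs t F l = l * pvMc t F + pvMs t F 0 := by
  induction F with
  | nil => simp [pvMs, pvMc]
  | cons k F IH =>
    simp only [pvMs, pvMc, List.map_cons, List.sum_cons] at *
    rw [IH]
    ring

theorem pvC_eq (t : List (Int × List Int)) (h : Pre_calculate t)
    (k : Int) (hk : k ∈ pvReach t) :
    pvC t k = (1 + pvMc t (pvChild t k), pvMs t (pvChild t k) 1) := by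
  rw [pvC_unfold t h k hk, pvFold_sum]
  simp

theorem pvHalf (x y : Int) (h : x = 2 * y) : PySem.Int.floordiv x 2 = y := by
  rw [PySem.Int.floordiv_eq_ediv_of_pos (by norm_num)]
  omega

theorem pvTri_succ (m : Int) : pvTri (m + 1) = pvTri m + m := by
  obtain ⟨x, hx⟩ := Int.even_mul_succ_self (m - 1)
  unfold pvTri
  rw [pvHalf (m * (m - 1)) x (by linear_combination hx),
      pvHalf ((m + 1) * (m + 1 - 1)) (x + m) (by linear_combination hx)]

theorem pvTri_split (a b : Int) : pvTri (a + b) = pvTri a + a * b + pvTri b := by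
  obtain ⟨x, hx⟩ := Int.even_mul_succ_self (a - 1)
  obtain ⟨y, hy⟩ := Int.even_mul_succ_self (b - 1)
  unfold pvTri
  rw [pvHalf (a * (a - 1)) x (by linear_combination hx),
      pvHalf (b * (b - 1)) y (by linear_combination hy),
      pvHalf ((a + b) * (a + b - 1)) (x + a * b + y) (by linear_combination hx + hy)]

theorem pvTri_zero : pvTri 0 = 0 := by decide

theorem pvLevel_aux (t : List (Int × List Int)) :
    ∀ (F : List Int) (l hs fb nodes : Int) (nxt : List Int),
      F.foldl (fun s root =>
          ((s.1.1 + l, s.1.2.1 + (s.1.2.2 - l), s.1.2.2 + 1), s.2 ++ pvChild t root))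
        ((hs, fb, nodes), nxt)
      = ((hs + l * F.length, fb + nodes * F.length + pvTri F.length - l * F.length,
          nodes + F.length), nxt ++ F.flatMap (pvChild t)) := by
  intro F
  induction F with
  | nil => intro l hs fb nodes nxt; simp [pvTri_zero]
  | cons k F IH =>
    intro l hs fb nodes nxt
    simp only [List.foldl_cons]
    rw [IH]
    simp only [List.length_cons, List.flatMap_cons, Prod.mk.injEq]
    push_cast
    have ht := pvTri_succ (F.length : Int)
    refine ⟨⟨by ring, by linarith, by ring⟩, by rw [List.append_assoc]⟩

theorem pvLevel_eq (t : List (Int × List Int)) (F : List Int) (l hs fb nodes : Int) :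
    pvLevel t F l (hs, fb, nodes) =
      ((hs + l * F.length, fb + nodes * F.length + pvTri F.length - l * F.length,
        nodes + F.length), F.flatMap (pvChild t)) := by
  unfold pvLevel
  rw [pvLevel_aux]
  simp

theorem pvMc_cons (t : List (Int × List Int)) (k : Int) (F : List Int) :
    pvMc t (k :: F) = (pvC t k).1 + pvMc t F := by simp [pvMc]

theorem pvMc_append (t : List (Int × List Int)) (F G : List Int) :
    pvMc t (F ++ G) = pvMc t F + pvMc t G := by simp [pvMc]

theorem pvMs_cons (t : List (Int × List Int)) (k : Int) (F : List Int) (l : Int) :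
    pvMs t (k :: F) l = l * (pvC t k).1 + (pvC t k).2 + pvMs t F l := by
  simp [pvMs]

theorem pvMs_append (t : List (Int × List Int)) (F G : List Int) (l : Int) :
    pvMs t (F ++ G) l = pvMs t F l + pvMs t G l := by simp [pvMs]

theorem pvStep_Mc (t : List (Int × List Int)) (h : Pre_calculate t)
    (F : List Int) (hF : ∀ k ∈ F, k ∈ pvReach t) :
    pvMc t F = (F.length : Int) + pvMc t (F.flatMap (pvChild t)) := by
  induction F with
  | nil => simp [pvMc]
  | cons k F IH =>
    have hk := hF k (by simp)
    have hC := pvC_eq t h k hk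
    simp only [List.flatMap_cons, List.length_cons, pvMc_cons, pvMc_append]
    rw [IH (fun x hx => hF x (by simp [hx])), hC]
    push_cast
    ring

theorem pvStep_Ms (t : List (Int × List Int)) (h : Pre_calculate t)
    (F : List Int) (hF : ∀ k ∈ F, k ∈ pvReach t) (l : Int) :
    pvMs t F l = l * (F.length : Int) + pvMs t (F.flatMap (pvChild t)) (l + 1) := by
  induction F with
  | nil => simp [pvMs]
  | cons k F IH =>
    have hk := hF k (by simp)
    have hC := pvC_eq t h k hk
    simp only [List.flatMap_cons, List.length_cons, pvMs_cons, pvMs_append]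
    rw [IH (fun x hx => hF x (by simp [hx])), hC]
    have h1 := pvMs_linear t (pvChild t k) 1
    have h2 := pvMs_linear t (pvChild t k) (l + 1)
    push_cast
    linear_combination h1 - h2

theorem pvLoop_eq (t : List (Int × List Int)) (h : Pre_calculate t) :
    ∀ fuel F l hs fb nodes, (∀ k ∈ F, k ∈ pvReach t ∧ pvRank t k < fuel) →
      pvLoop t fuel F l hs fb nodes =
        (hs + pvMs t F l, fb + nodes * pvMc t F + pvTri (pvMc t F) - pvMs t F l) := by
  intro fuel
  induction fuel with
  | zero =>
    intro F l hs fb nodes hF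
    have hFnil : F = [] := by
      cases F with
      | nil => rfl
      | cons k F => exact absurd (hF k (by simp)).2 (by omega)
    subst hFnil
    simp [pvLoop, pvMc, pvMs, pvTri_zero]
  | succ fuel IH =>
    intro F l hs fb nodes hF
    by_cases hFnil : F = []
    · subst hFnil
      simp [pvLoop, pvMc, pvMs, pvTri_zero]
    · simp only [pvLoop, if_neg hFnil]
      rw [pvLevel_eq]
      have hF1 : ∀ k ∈ F, k ∈ pvReach t := fun k hk => (hF k hk).1
      have hF' : ∀ k' ∈ F.flatMap (pvChild t), k' ∈ pvReach t ∧ pvRank t k' < fuel := by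
        intro k' hk'
        obtain ⟨k, hk, hc⟩ := List.mem_flatMap.mp hk'
        have h1 : k' ∈ pvReach t := pvChild_reach t h (hF1 k hk) hc
        have h2 : pvRank t k' < pvRank t k := pvRank_lt t h (hF1 k hk) hc
        exact ⟨h1, by have := (hF k hk).2; omega⟩
      rw [IH _ _ _ _ _ hF']
      have hMc := pvStep_Mc t h F hF1
      have hMs := pvStep_Ms t h F hF1 l
      have hTri := pvTri_split (F.length : Int) (pvMc t (F.flatMap (pvChild t)))
      rw [Prod.mk.injEq]
      constructor
      · linarith
      · rw [hMc, hTri]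
        linarith [mul_comm (nodes : Int) (F.length : Int)]

theorem pvRoots_reach (t : List (Int × List Int)) :
    ∀ k ∈ pvChild t 0, k ∈ pvReach t := by
  intro k hk
  exact pvSubset_clos t _ (List.mem_toFinset.mpr hk)

theorem calculate_eq (t : List (Int × List Int)) (h : Pre_calculate t) :
    calculate t = (pvMs t (pvChild t 0) 0,
      pvTri (pvMc t (pvChild t 0)) - pvMs t (pvChild t 0) 0) := by
  unfold calculate
  rw [pvLoop_eq t h]
  · simp
  · intro k hk
    have h1 := pvRoots_reach t k hk
    exact ⟨h1, by have := pvRank_le t h h1; omega⟩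

theorem pvC_pos (t : List (Int × List Int)) (h : Pre_calculate t) :
    ∀ n k, k ∈ pvReach t → pvRank t k = n → 1 ≤ (pvC t k).1 := by
  intro n
  induction n using Nat.strong_induction_on with
  | _ n IH =>
    intro k hk hrk
    subst hrk
    rw [pvC_eq t h k hk]
    have hMc : 0 ≤ pvMc t (pvChild t k) := by
      have : ∀ F, (∀ c ∈ F, c ∈ pvChild t k) → 0 ≤ pvMc t F := by
        intro F
        induction F with
        | nil => intro _; simp [pvMc]
        | cons c F IHF =>
          intro hF
          have hcc := hF c (by simp)
          have hcr : c ∈ pvReach t := pvChild_reach t h hk hcc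
          have h1 : 1 ≤ (pvC t c).1 :=
            IH (pvRank t c) (pvRank_lt t h hk hcc) c hcr rfl
          rw [pvMc_cons]
          have := IHF (fun x hx => hF x (by simp [hx]))
          omega
      exact this (pvChild t k) (fun _ hc => hc)
    simp only
    omega

theorem pvMcP_pos (t : List (Int × List Int)) (S : List (Int × Int))
    (hS : ∀ p ∈ S, 1 ≤ (pvC t p.1).1) : 0 ≤ pvMcP t S := by
  induction S with
  | nil => simp [pvMcP]
  | cons p S IH =>
    have h1 := hS p (by simp)
    have h2 := IH (fun x hx => hS x (by simp [hx]))
    simp only [pvMcP, List.map_cons, List.sum_cons] at *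
    omega

theorem pvMcP_map (t : List (Int × List Int)) (F : List Int) (d : Int) :
    pvMcP t (F.map (fun c => (c, d))) = pvMc t F := by
  simp [pvMcP, pvMc, Function.comp_def]

theorem pvMsP_map (t : List (Int × List Int)) (F : List Int) (d : Int) :
    pvMsP t (F.map (fun c => (c, d))) = pvMs t F d := by
  simp [pvMsP, pvMs, Function.comp_def]

theorem pvMcP_reverse (t : List (Int × List Int)) (S : List (Int × Int)) :
    pvMcP t S.reverse = pvMcP t S := by simp [pvMcP]

theorem pvMsP_reverse (t : List (Int × List Int)) (S : List (Int × Int)) :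
    pvMsP t S.reverse = pvMsP t S := by simp [pvMsP]

theorem pvMcP_append (t : List (Int × List Int)) (S R : List (Int × Int)) :
    pvMcP t (S ++ R) = pvMcP t S + pvMcP t R := by simp [pvMcP]

theorem pvMsP_append (t : List (Int × List Int)) (S R : List (Int × Int)) :
    pvMsP t (S ++ R) = pvMsP t S + pvMsP t R := by simp [pvMsP]

theorem pvDfs_eq (t : List (Int × List Int)) (h : Pre_calculate t) :
    ∀ fuel (S : List (Int × Int)) (ds n : Int),
      (∀ p ∈ S, p.1 ∈ pvReach t) → (pvMcP t S).toNat < fuel →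
      pvDfs t fuel S ds n = (ds + pvMsP t S, n + pvMcP t S) := by
  intro fuel
  induction fuel with
  | zero => intro S ds n _ hlt; omega
  | succ fuel IH =>
    intro S ds n hS hlt
    match S with
    | [] => simp [pvDfs, pvMcP, pvMsP]
    | (k, d) :: rest =>
      have hk : k ∈ pvReach t := hS (k, d) (by simp)
      have hC := pvC_eq t h k hk
      have hcnt : (pvC t k).1 = 1 + pvMc t (pvChild t k) := by rw [hC]
      have hsk : (pvC t k).2 = pvMs t (pvChild t k) 1 := by rw [hC]
      simp only [pvDfs]
      have hS' : ∀ p ∈ ((pvChild t k).map (fun c => (c, d + 1))).reverse ++ rest,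
          p.1 ∈ pvReach t := by
        intro p hpin
        rcases List.mem_append.mp hpin with hin | hin
        · obtain ⟨c, hc, hcp⟩ := List.mem_map.mp (List.mem_reverse.mp hin)
          rw [← hcp]
          exact pvChild_reach t h hk hc
        · exact hS p (by simp [hin])
      have hMc' : pvMcP t (((pvChild t k).map (fun c => (c, d + 1))).reverse ++ rest)
          = pvMcP t ((k, d) :: rest) - 1 := by
        rw [pvMcP_append, pvMcP_reverse, pvMcP_map]
        simp only [pvMcP, List.map_cons, List.sum_cons]
        omega
      have hpos0 : 0 ≤ pvMcP t (((pvChild t k).map (fun c => (c, d + 1))).reverse ++ rest) := by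
        apply pvMcP_pos
        intro p hpin
        exact pvC_pos t h (pvRank t p.1) p.1 (hS' p hpin) rfl
      rw [IH _ _ _ hS' (by omega)]
      have hMs' : pvMsP t (((pvChild t k).map (fun c => (c, d + 1))).reverse ++ rest)
          = pvMs t (pvChild t k) (d + 1) + pvMsP t rest := by
        rw [pvMsP_append, pvMsP_reverse, pvMsP_map]
      rw [Prod.mk.injEq]
      constructor
      · rw [hMs']
        simp only [pvMsP, List.map_cons, List.sum_cons]
        have hl1 := pvMs_linear t (pvChild t k) 1
        have hl2 := pvMs_linear t (pvChild t k) (d + 1)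
        rw [hcnt, hsk]
        linear_combination hl2 - hl1
      · rw [hMc']
        ring

theorem calculate_alt_eq (t : List (Int × List Int)) (h : Pre_calculate t) :
    calculate_alt t = (pvMs t (pvChild t 0) 0,
      pvTri (pvMc t (pvChild t 0)) - pvMs t (pvChild t 0) 0) := by
  dsimp only [calculate_alt]
  rw [pvDfs_eq t h]
  · rw [pvMcP_map, pvMsP_map]
    simp only [zero_add]
    rfl
  · intro p hpin
    obtain ⟨c, hc, hcp⟩ := List.mem_map.mp hpin
    rw [← hcp]
    exact pvRoots_reach t c hc
  · rw [pvMcP_map]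
    omega

-- ===== VERDICT (by name: the statement is the Claim_ definition above) =====
theorem calculate_spec : Claim_equal_calculate := by
  intro tree _ hpre
  unfold Spec_calculate
  rw [calculate_eq tree hpre, calculate_alt_eq tree hpre]
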